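-- pv_equiv track=rewrite | github.com/matchaism/website | scripts/hatena_articles.py | separate_article_info_list_by_published_year
-- ===== SOURCE A (Python) =====
-- from typing import Optional, List, Dict
-- from collections import defaultdict
--
-- def separate_article_info_list_by_published_year(
--     article_info_list: List[Dict[str, str]],
-- ) -> Dict[str, List[Dict[str, str]]]:
--     separated: Dict[str, List[Dict[str, str]]] = defaultdict(list)
--
--     for article_info in article_info_list:
--         year = article_info["published_date"].split("/")[0]
--         separated[year].append(article_info)
--
--     return separated
-- ===== SOURCE B (Python) =====
-- from typing import Optional, List, Dict
-- from collections import defaultdict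
--
--
-- def separate_article_info_list_by_published_year(
--     article_info_list: List[Dict[str, str]],
-- ) -> Dict[str, List[Dict[str, str]]]:
--     def year_of(article_info):
--         return article_info["published_date"].split("/")[0]
--
--     groups = []
--     remaining = list(article_info_list)
--     while remaining:
--         y = year_of(remaining[0])
--         groups.append((y, [a for a in remaining if year_of(a) == y]))
--         remaining = [a for a in remaining if year_of(a) != y]
--     return defaultdict(list, dict(groups))
-- ===== Notes on version B (the rewrite author's own statement) =====
-- stated objective: alternative
-- what changed: B replaces A's per-element defaultdict accumulation with repeated partitioning: while articles remain, take the first one's year, emit that whole year-group by one filtering pass and drop it from the remaining list, then assemble the dict from the finished (year, group) pairs.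
import Mathlib
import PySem

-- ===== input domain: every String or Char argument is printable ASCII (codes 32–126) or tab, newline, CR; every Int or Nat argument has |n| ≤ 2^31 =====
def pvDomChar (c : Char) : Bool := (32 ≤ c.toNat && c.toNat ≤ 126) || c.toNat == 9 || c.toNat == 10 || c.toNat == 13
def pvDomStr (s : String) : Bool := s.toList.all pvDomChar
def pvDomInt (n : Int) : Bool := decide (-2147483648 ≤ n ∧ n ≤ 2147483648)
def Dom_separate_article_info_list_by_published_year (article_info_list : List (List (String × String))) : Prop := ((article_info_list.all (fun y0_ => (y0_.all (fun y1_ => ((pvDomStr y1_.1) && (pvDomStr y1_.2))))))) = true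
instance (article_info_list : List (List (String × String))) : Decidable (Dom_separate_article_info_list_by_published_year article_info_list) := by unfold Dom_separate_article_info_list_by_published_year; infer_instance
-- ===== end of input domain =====

-- B groups by repeated partitioning (peel off the first remaining year's whole group per round)
-- instead of A's per-element defaultdict accumulation; same return value, objective: alternative.

-- ===== PORT A =====
-- article_info["published_date"].split("/")[0]; total under Pre_ (the key is present; split("/") is never empty)
def pvYearA (article_info : List (String × String)) : String :=
  (((PySem.Str.split? ((PySem.Dict.mk article_info).getD "published_date" "") "/").getD []).headD "")

def separate_article_info_list_by_published_year (article_info_list : List (List (String × String))) : List (String × List (List (String × String))) :=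
  -- separated[year].append(article_info) on a defaultdict(list) = modify year [] (· ++ [article_info])
  (article_info_list.foldl
    (fun separated article_info =>
      separated.modify (pvYearA article_info) [] (· ++ [article_info]))
    PySem.Dict.empty).items

-- ===== PORT B =====
-- year_of, same expression as in Source B
def pvYearB (article_info : List (String × String)) : String :=
  (((PySem.Str.split? ((PySem.Dict.mk article_info).getD "published_date" "") "/").getD []).headD "")

-- Source B's while loop: peel off the group of the first remaining article's year, recurse on the rest
def pvGroupByYear : List (List (String × String)) → List (String × List (List (String × String)))
  | [] => []
  | a :: t =>
    (pvYearB a, (a :: t).filter (fun b => pvYearB b == pvYearB a)) ::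
      pvGroupByYear ((a :: t).filter (fun b => !(pvYearB b == pvYearB a)))
  termination_by l => l.length
  decreasing_by
    simp only [List.filter_cons, beq_self_eq_true, Bool.not_true, List.length_cons]
    exact Nat.lt_succ_of_le (List.length_filter_le _ _)

def separate_article_info_list_by_published_year_alt (article_info_list : List (List (String × String))) : List (String × List (List (String × String))) :=
  -- defaultdict(list, dict(groups)): the (year, group) pairs have distinct keys, in first-occurrence order
  pvGroupByYear article_info_list

-- ===== PRECONDITION & SPEC =====
-- Pre_ excludes exactly the inputs where A raises KeyError: an article without a "published_date" key.
def Pre_separate_article_info_list_by_published_year (article_info_list : List (List (String × String))) : Prop :=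
  ∀ a ∈ article_info_list, (PySem.Dict.mk a).contains "published_date" = true
instance (article_info_list : List (List (String × String))) : Decidable (Pre_separate_article_info_list_by_published_year article_info_list) := by unfold Pre_separate_article_info_list_by_published_year; infer_instance

def pvWitness_separate_article_info_list_by_published_year : (List (List (String × String))) :=
  [[("published_date", "2020/01/02"), ("title", "x")], [("published_date", "2021/03/04")], [("published_date", "2020/05/06")]]

def Spec_separate_article_info_list_by_published_year (article_info_list : List (List (String × String))) (out : List (String × List (List (String × String)))) : Prop := out = separate_article_info_list_by_published_year_alt article_info_list
instance (article_info_list : List (List (String × String))) (out : List (String × List (List (String × String)))) : Decidable (Spec_separate_article_info_list_by_published_year article_info_list out) := by unfold Spec_separate_article_info_list_by_published_year; infer_instance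

-- ===== CLAIM (what is proved, stated in full; the proofs are below) =====
def Claim_equal_separate_article_info_list_by_published_year : Prop := ∀ (article_info_list : List (List (String × String))), Dom_separate_article_info_list_by_published_year article_info_list → Pre_separate_article_info_list_by_published_year article_info_list → Spec_separate_article_info_list_by_published_year article_info_list (separate_article_info_list_by_published_year article_info_list)

-- ===== LEMMAS AND PROOFS =====

-- value accumulated for key c by A's loop = filter of the processed prefix
lemma pv_getD_foldl_group {α : Type} (key : α → String) (l : List α)
    (d : PySem.Dict String (List α)) (c : String) :
    (l.foldl (fun d a => d.modify (key a) [] (· ++ [a])) d).getD c []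
      = d.getD c [] ++ l.filter (fun a => key a == c) := by
  induction l generalizing d with
  | nil => simp
  | cons a t ih =>
      simp only [List.foldl_cons, List.filter_cons, ih]
      by_cases h : key a = c
      · simp [h]
      · simp [PySem.Dict.getD_modify, h, Ne.symm h]

lemma pv_foldl_add_cons {α : Type} [BEq α] [LawfulBEq α] (zs : List α) (a : α) (s : List α)
    (h : a ∉ zs) : zs.foldl PySem.Set.add (a :: s) = a :: zs.foldl PySem.Set.add s := by
  induction zs generalizing s with
  | nil => rfl
  | cons z t ih =>
      have hza : ¬ (z == a) = true := by
        simp only [beq_iff_eq]; rintro rfl; exact h (List.mem_cons_self)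
      simp only [List.foldl_cons, PySem.Set.add, PySem.Set.contains, List.contains_cons, hza,
        Bool.false_or]
      by_cases hz : s.contains z = true
      · simp only [hz, if_true]
        exact ih s (fun hm => h (List.mem_cons_of_mem _ hm))
      · simp only [hz, List.cons_append]
        exact ih (s ++ [z]) (fun hm => h (List.mem_cons_of_mem _ hm))

lemma pv_foldl_add_mem_filter {α : Type} [BEq α] [LawfulBEq α] (zs : List α) (s : List α) (x : α)
    (h : x ∈ s) :
    zs.foldl PySem.Set.add s = (zs.filter (fun z => !(z == x))).foldl PySem.Set.add s := by
  induction zs generalizing s with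
  | nil => rfl
  | cons z t ih =>
      simp only [List.foldl_cons, List.filter_cons]
      by_cases hz : z = x
      · subst hz
        have hadd : PySem.Set.add s z = s := by
          simp [PySem.Set.add, PySem.Set.contains, h]
        have hcond : (!(z == z)) = false := by simp
        simp only [hadd, hcond]
        exact ih s h
      · have : (!(z == x)) = true := by simp [hz]
        simp only [this]
        exact ih (PySem.Set.add s z) (by
          simp only [PySem.Set.add]
          split
          · exact h
          · exact List.mem_append_left _ h)

-- dict.fromkeys-style dedup unfolds one distinct key at a time
lemma pv_dedup_cons {α : Type} [BEq α] [LawfulBEq α] (x : α) (ys : List α) :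
    PySem.List.dedup (x :: ys) = x :: PySem.List.dedup (ys.filter (fun z => !(z == x))) := by
  have h1 : PySem.List.dedup (x :: ys) = ys.foldl PySem.Set.add [x] := by
    simp [PySem.List.dedup_eq_ofList, PySem.Set.ofList_eq_foldl, List.foldl_cons,
      PySem.Set.add, PySem.Set.contains]
  have h2 : PySem.List.dedup (ys.filter (fun z => !(z == x)))
      = (ys.filter (fun z => !(z == x))).foldl PySem.Set.add [] := by
    simp [PySem.List.dedup_eq_ofList, PySem.Set.ofList_eq_foldl]
  rw [h1, h2, pv_foldl_add_mem_filter ys [x] x (List.mem_singleton.mpr rfl)]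
  exact pv_foldl_add_cons _ x [] (by simp)

-- B's partition recursion in normal form: one entry per distinct year, each the full filter
lemma pv_group_eq (l : List (List (String × String))) :
    pvGroupByYear l
      = (PySem.List.dedup (l.map pvYearB)).map
          (fun y => (y, l.filter (fun a => pvYearB a == y))) := by
  induction hn : l.length using Nat.strong_induction_on generalizing l with
  | _ n ih =>
    cases l with
    | nil => simp [pvGroupByYear]
    | cons a t =>
      have hhead : (a :: t).filter (fun b => !(pvYearB b == pvYearB a))
          = t.filter (fun b => !(pvYearB b == pvYearB a)) := by
        simp
      have hlen : (t.filter (fun b => !(pvYearB b == pvYearB a))).length < n := by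
        subst hn
        exact Nat.lt_succ_of_le (List.length_filter_le _ _)
      have hmapfilter : (t.filter (fun b => !(pvYearB b == pvYearB a))).map pvYearB
          = (t.map pvYearB).filter (fun z => !(z == pvYearB a)) := by
        rw [List.filter_map]; rfl
      rw [pvGroupByYear, hhead, ih _ hlen _ rfl, hmapfilter, List.map_cons,
        pv_dedup_cons (pvYearB a) (t.map pvYearB), List.map_cons]
      refine congrArg₂ List.cons rfl ?_
      refine List.map_congr_left (fun y hy => ?_)
      have hyne : y ≠ pvYearB a := by
        have := (PySem.List.mem_dedup _ _).mp hy
        simp only [List.mem_filter, Bool.not_eq_eq_eq_not, Bool.not_true,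
          beq_eq_false_iff_ne, ne_eq] at this
        exact this.2
      have hfalse : (pvYearB a == y) = false := by
        simp only [beq_eq_false_iff_ne, ne_eq]; exact fun h => hyne h.symm
      refine congrArg₂ Prod.mk rfl ?_
      rw [List.filter_cons, hfalse]
      simp only [List.filter_filter]
      refine List.filter_congr (fun b _ => ?_)
      by_cases hb : pvYearB b = y
      · simp [hb, hyne]
      · simp [hb]

-- ===== VERDICT (by name: the statement is the Claim_ definition above) =====
theorem separate_article_info_list_by_published_year_spec : Claim_equal_separate_article_info_list_by_published_year := by
  intro l _ _
  show _ = _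
  unfold separate_article_info_list_by_published_year separate_article_info_list_by_published_year_alt
  have hnd : (l.foldl (fun d a => d.modify (pvYearA a) [] (· ++ [a])) PySem.Dict.empty).keys.Nodup :=
    PySem.Dict.nodup_keys_foldl_modify_key l pvYearA [] (fun _ a => (· ++ [a])) PySem.Dict.empty (by simp)
  rw [PySem.Dict.items_eq_map_keys _ hnd []]
  have hkeys : (l.foldl (fun d a => d.modify (pvYearA a) [] (· ++ [a])) PySem.Dict.empty).keys
      = PySem.List.dedup (l.map pvYearA) := by
    rw [PySem.Dict.keys_foldl_modify_key]
    simp [PySem.Set.update, PySem.Set.ofList_eq_foldl, PySem.Dict.keys_empty]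
  rw [hkeys, pv_group_eq]
  refine List.map_congr_left (fun y _ => ?_)
  rw [pv_getD_foldl_group pvYearA l PySem.Dict.empty y]
  simp [pvYearA, pvYearB]
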